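-- pv_equiv track=rewrite | github.com/huggingface/optimum-neuron | optimum/neuron/backends/hlo/utils.py | build_replica_groups
-- ===== SOURCE A (Python) =====
-- def build_replica_groups(num_groups, group_size, interleave=False):
--     """
--     Construct replica_groups to handle "intra-group" reduce operations.
--
--     Each nested list represents the ids of the cores within the same group.
--
--     Examples:
--
--         group_size = 2
--         num_groups = 3
--         replica_groups = [[0, 1], [2, 3], [4, 5]]
--
--         group_size = 3
--         num_groups = 2
--         replica_groups = [[0, 1, 2], [3, 4, 5]]
--
--     """
--     if interleave:
--         limit = num_groups * group_size
--         ncs = list(range(limit))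
--         slices = [slice(i, limit, num_groups) for i in range(num_groups)]
--         replica_groups = [ncs[s] for s in slices]
--     else:
--         replica_groups = [
--             list(range(group_size * group, group_size * group + group_size)) for group in range(num_groups)
--         ]
--     return replica_groups
-- ===== SOURCE B (Python) =====
-- def build_replica_groups(num_groups, group_size, interleave=False):
--     # One linear scatter pass: drop each core id into its bucket.
--     buckets = [[] for _ in range(num_groups)]
--     if num_groups > 0:
--         for nc in range(num_groups * group_size):
--             buckets[nc % num_groups if interleave else nc // group_size].append(nc)
--     return buckets
-- ===== Notes on version B (the rewrite author's own statement) =====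
-- stated objective: alternative
-- what changed: Replaces A's per-group gather (range comprehensions / strided slices into a prebuilt id list) with a single scatter pass that appends each id nc once into bucket nc//group_size (or nc%num_groups when interleaving).
import Mathlib
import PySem

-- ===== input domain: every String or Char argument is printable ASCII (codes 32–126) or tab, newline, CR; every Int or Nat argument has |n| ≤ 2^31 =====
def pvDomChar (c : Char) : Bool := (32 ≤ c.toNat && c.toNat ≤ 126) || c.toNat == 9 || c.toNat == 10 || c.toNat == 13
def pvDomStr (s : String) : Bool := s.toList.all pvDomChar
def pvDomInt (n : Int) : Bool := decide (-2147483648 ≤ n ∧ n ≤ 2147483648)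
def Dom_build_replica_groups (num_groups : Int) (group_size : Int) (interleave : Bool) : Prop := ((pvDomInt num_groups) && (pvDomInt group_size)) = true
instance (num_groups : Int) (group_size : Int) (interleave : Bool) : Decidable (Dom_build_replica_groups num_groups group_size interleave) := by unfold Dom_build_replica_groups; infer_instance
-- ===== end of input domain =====

-- B replaces A's per-group gather (range comprehensions / strided slices) with a single
-- scatter pass appending each id into its bucket; same cost, alternative decomposition.

-- ===== PORT A =====
-- Literal port of A. The `.getD []` on the slice is unreachable: the slice comprehension
-- only runs for i in range(num_groups) with num_groups ≥ 1, so the step is never 0.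
def build_replica_groups (num_groups : Int) (group_size : Int) (interleave : Bool) : List (List Int) :=
  if interleave then
    let limit := num_groups * group_size
    let ncs := PySem.List.pyRange 0 limit 1
    (PySem.List.pyRange 0 num_groups 1).map
      (fun i => (PySem.List.slice? ncs (some i) (some limit) num_groups).getD [])
  else
    (PySem.List.pyRange 0 num_groups 1).map
      (fun group => PySem.List.pyRange (group_size * group) (group_size * group + group_size) 1)

-- ===== PORT B =====
-- Literal port of B (Source B). Inside the loop the bucket index is always ≥ 0 (the loop only
-- runs when num_groups > 0 and group_size > 0), so `.toNat` is exact there.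
def build_replica_groups_alt (num_groups : Int) (group_size : Int) (interleave : Bool) : List (List Int) :=
  let buckets := (PySem.List.pyRange 0 num_groups 1).map (fun _ => ([] : List Int))
  if 0 < num_groups then
    (PySem.List.pyRange 0 (num_groups * group_size) 1).foldl
      (fun bks nc =>
        bks.modify (if interleave then PySem.Int.mod nc num_groups
                    else PySem.Int.floordiv nc group_size).toNat
          (fun grp => grp ++ [nc]))
      buckets
  else buckets

-- ===== PRECONDITION & SPEC =====
def Spec_build_replica_groups (num_groups : Int) (group_size : Int) (interleave : Bool) (out : List (List Int)) : Prop := out = build_replica_groups_alt num_groups group_size interleave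
instance (num_groups : Int) (group_size : Int) (interleave : Bool) (out : List (List Int)) : Decidable (Spec_build_replica_groups num_groups group_size interleave out) := by unfold Spec_build_replica_groups; infer_instance

-- ===== CLAIM (what is proved, stated in full; the proofs are below) =====
def Claim_equal_build_replica_groups : Prop := ∀ (num_groups : Int) (group_size : Int) (interleave : Bool), Dom_build_replica_groups num_groups group_size interleave → Spec_build_replica_groups num_groups group_size interleave (build_replica_groups num_groups group_size interleave)

-- ===== LEMMAS AND PROOFS =====

-- Unique floor-division/remainder characterisation used to evaluate the bucket predicate.
lemma fdiv_fmod_eq (d q0 x : Int) (hd : 0 < d) (h1 : d * q0 ≤ x) (h2 : x < d * q0 + d) :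
    x.fdiv d = q0 ∧ x.fmod d = x - d * q0 := by
  have hdec : d * (x.fdiv d) + x.fmod d = x := Int.mul_fdiv_add_fmod x d
  have hr1 : x.fmod d < d := Int.fmod_lt_of_pos x hd
  have hr0 : 0 ≤ x.fmod d := Int.fmod_nonneg_of_pos x hd
  rcases lt_trichotomy (x.fdiv d) q0 with h | h | h
  · exfalso
    have hm : d * (x.fdiv d) ≤ d * (q0 - 1) := mul_le_mul_of_nonneg_left (by omega) hd.le
    linarith
  · refine ⟨h, ?_⟩; rw [h] at hdec; linarith
  · exfalso
    have hm : d * (q0 + 1) ≤ d * (x.fdiv d) := mul_le_mul_of_nonneg_left (by omega) hd.le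
    linarith

-- The scatter loop, read off bucket by bucket: bucket g collects exactly the ids whose key is g.
lemma scatter_get (key : Int → Int) (g : Nat) :
    ∀ (L : List Int) (bks : List (List Int)),
      (L.foldl (fun b nc => b.modify (key nc).toNat (fun grp => grp ++ [nc])) bks)[g]? =
        bks[g]?.map (fun grp => grp ++ L.filter (fun nc => (key nc).toNat == g))
  | [], bks => by simp
  | nc :: L, bks => by
    rw [List.foldl_cons, scatter_get key g L, List.getElem?_modify]
    by_cases h : (key nc).toNat = g
    · cases hb : bks[g]? with
      | none => simp
      | some grp => simp [h]
    · cases hb : bks[g]? with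
      | none => simp
      | some grp => simp [h]

-- One aligned block of size n contains exactly one id with remainder g.
lemma filter_block (n mlo : Int) (hn : 0 < n) (g : Nat) (hg : (g : Int) < n) :
    (PySem.List.pyRange (n * mlo) (n * mlo + n) 1).filter (fun x => (x.fmod n).toNat == g)
      = [n * mlo + g] := by
  have hs1 : PySem.List.pyRange (n * mlo) (n * mlo + n) 1
      = PySem.List.pyRange (n * mlo) (n * mlo + g) 1 ++ PySem.List.pyRange (n * mlo + g) (n * mlo + n) 1 :=
    PySem.List.pyRange_one_append _ _ _ (by omega) (by omega)
  have hs2 : PySem.List.pyRange (n * mlo + g) (n * mlo + n) 1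
      = PySem.List.pyRange (n * mlo + g) ((n * mlo + g) + 1) 1 ++ PySem.List.pyRange ((n * mlo + g) + 1) (n * mlo + n) 1 :=
    PySem.List.pyRange_one_append _ _ _ (by omega) (by omega)
  rw [hs1, List.filter_append, hs2, List.filter_append, PySem.List.pyRange_one_singleton]
  have hleft : (PySem.List.pyRange (n * mlo) (n * mlo + g) 1).filter (fun x => (x.fmod n).toNat == g) = [] := by
    rw [List.filter_eq_nil_iff]
    intro x hx
    rw [PySem.List.mem_pyRange_one] at hx
    obtain ⟨-, hm⟩ := fdiv_fmod_eq n mlo x hn (by linarith [hx.1]) (by linarith [hx.2])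
    rw [hm]
    simp only [beq_iff_eq]
    omega
  have hmid : (List.filter (fun x => (x.fmod n).toNat == g) [n * mlo + g]) = [n * mlo + g] := by
    rw [List.filter_eq_self]
    intro x hx
    simp only [List.mem_singleton] at hx
    subst hx
    obtain ⟨-, hm⟩ := fdiv_fmod_eq n mlo (n * mlo + g) hn (by omega) (by omega)
    rw [hm]
    simp only [beq_iff_eq]
    omega
  have hright : (PySem.List.pyRange ((n * mlo + g) + 1) (n * mlo + n) 1).filter (fun x => (x.fmod n).toNat == g) = [] := by
    rw [List.filter_eq_nil_iff]
    intro x hx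
    rw [PySem.List.mem_pyRange_one] at hx
    obtain ⟨-, hm⟩ := fdiv_fmod_eq n mlo x hn (by linarith [hx.1]) (by linarith [hx.2])
    rw [hm]
    simp only [beq_iff_eq]
    omega
  rw [hleft, hmid, hright]
  simp

-- Interleaved bucket g of range(n*m) is the arithmetic progression g, g+n, …
lemma filter_interleave (n : Int) (hn : 0 < n) (g : Nat) (hg : (g : Int) < n) :
    ∀ m : Nat, (PySem.List.pyRange 0 (n * m) 1).filter (fun x => (x.fmod n).toNat == g)
      = (List.range m).map (fun k : Nat => (g : Int) + n * (k : Int))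
  | 0 => by simp [PySem.List.pyRange_one_eq_nil]
  | m + 1 => by
    have hEnd : (n : Int) * ((m : Nat) + 1 : Nat) = n * m + n := by push_cast; ring
    have hnm : (0 : Int) ≤ n * m := by positivity
    have hsplit : PySem.List.pyRange 0 (n * ((m : Nat) + 1 : Nat)) 1
        = PySem.List.pyRange 0 (n * m) 1 ++ PySem.List.pyRange (n * m) (n * m + n) 1 := by
      rw [hEnd]; exact PySem.List.pyRange_one_append 0 (n * m) (n * m + n) hnm (by omega)
    rw [hsplit, List.filter_append, filter_interleave n hn g hg m, filter_block n m hn g hg,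
      List.range_succ, List.map_append]
    have : (n : Int) * m + g = g + n * m := by ring
    simp [this]

-- Contiguous bucket g of range(n*gs) is exactly range(gs*g, gs*g+gs).
lemma filter_contiguous (n gs : Int) (hn : 0 < n) (hgs : 0 < gs) (g : Nat) (hg : (g : Int) < n) :
    (PySem.List.pyRange 0 (n * gs) 1).filter (fun x => (x.fdiv gs).toNat == g)
      = PySem.List.pyRange (gs * g) (gs * g + gs) 1 := by
  have hup : gs * ((g : Int) + 1) ≤ gs * n := mul_le_mul_of_nonneg_left (by omega) hgs.le
  have hub : gs * (g : Int) + gs ≤ n * gs := by nlinarith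
  have hlb : (0 : Int) ≤ gs * g := by positivity
  have hs1 : PySem.List.pyRange 0 (n * gs) 1
      = PySem.List.pyRange 0 (gs * g) 1 ++ PySem.List.pyRange (gs * g) (n * gs) 1 :=
    PySem.List.pyRange_one_append _ _ _ hlb (by omega)
  have hs2 : PySem.List.pyRange (gs * g) (n * gs) 1
      = PySem.List.pyRange (gs * g) (gs * g + gs) 1 ++ PySem.List.pyRange (gs * g + gs) (n * gs) 1 :=
    PySem.List.pyRange_one_append _ _ _ (by omega) (by omega)
  rw [hs1, List.filter_append, hs2, List.filter_append]
  have hleft : (PySem.List.pyRange 0 (gs * g) 1).filter (fun x => (x.fdiv gs).toNat == g) = [] := by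
    rw [List.filter_eq_nil_iff]
    intro x hx hpred
    rw [PySem.List.mem_pyRange_one] at hx
    simp only [beq_iff_eq] at hpred
    have hdec : gs * (x.fdiv gs) + x.fmod gs = x := Int.mul_fdiv_add_fmod x gs
    have hr0 : 0 ≤ x.fmod gs := Int.fmod_nonneg_of_pos x hgs
    rcases lt_or_ge (x.fdiv gs) 0 with hq | hq
    · have hg0 : g = 0 := by omega
      subst hg0
      simp only [Nat.cast_zero, mul_zero] at hx
      omega
    · have hq' : x.fdiv gs = (g : Int) := by omega
      rw [hq'] at hdec
      linarith [hx.2]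
  have hmid : (PySem.List.pyRange (gs * g) (gs * g + gs) 1).filter (fun x => (x.fdiv gs).toNat == g)
      = PySem.List.pyRange (gs * g) (gs * g + gs) 1 := by
    rw [List.filter_eq_self]
    intro x hx
    rw [PySem.List.mem_pyRange_one] at hx
    obtain ⟨hd, -⟩ := fdiv_fmod_eq gs g x hgs (by linarith [hx.1]) (by linarith [hx.2])
    rw [hd]
    simp
  have hright : (PySem.List.pyRange (gs * g + gs) (n * gs) 1).filter (fun x => (x.fdiv gs).toNat == g) = [] := by
    rw [List.filter_eq_nil_iff]
    intro x hx hpred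
    rw [PySem.List.mem_pyRange_one] at hx
    simp only [beq_iff_eq] at hpred
    have hdec : gs * (x.fdiv gs) + x.fmod gs = x := Int.mul_fdiv_add_fmod x gs
    have hr0 : 0 ≤ x.fmod gs := Int.fmod_nonneg_of_pos x hgs
    have hr1 : x.fmod gs < gs := Int.fmod_lt_of_pos x hgs
    rcases lt_or_ge (x.fdiv gs) 0 with hq | hq
    · have hg0 : g = 0 := by omega
      have hm : gs * (x.fdiv gs) ≤ gs * (-1) := mul_le_mul_of_nonneg_left (by omega) hgs.le
      subst hg0
      simp only [Nat.cast_zero, mul_zero, zero_add] at hx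
      linarith [hx.1]
    · have hq' : x.fdiv gs = (g : Int) := by omega
      rw [hq'] at hdec
      linarith [hx.1]
  rw [hleft, hmid, hright]
  simp

-- filterMap collapses to map when every element maps to some.
lemma filterMap_eq_map_of {α β : Type} (f : α → Option β) (h : α → β) :
    ∀ (L : List α), (∀ x ∈ L, f x = some (h x)) → L.filterMap f = L.map h
  | [], _ => rfl
  | x :: L, H => by
    rw [List.filterMap_cons, H x (by simp), List.map_cons,
      filterMap_eq_map_of f h L (fun y hy => H y (by simp [hy]))]

-- Python's extended slice range(limit)[i:limit:n] is the progression i, i+n, …, of length gs.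
lemma slice_interleave (n gs : Int) (hn : 0 < n) (hgs : 0 < gs) (g : Nat) (hg : (g : Int) < n) :
    PySem.List.slice? (PySem.List.pyRange 0 (n * gs) 1) (some (g : Int)) (some (n * gs)) n
      = some ((List.range gs.toNat).map (fun k : Nat => (g : Int) + n * (k : Int))) := by
  have hpos : (0 : Int) < n * gs := by positivity
  have hlen : (PySem.List.pyRange 0 (n * gs) 1).length = (n * gs).toNat := by
    simp [PySem.List.length_pyRange_one]
  have hcastlen : (((n * gs).toNat : Nat) : Int) = n * gs := Int.toNat_of_nonneg hpos.le
  have hgle : (g : Int) ≤ n * gs := by nlinarith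
  have hidx : PySem.List.sliceIndices (PySem.List.pyRange 0 (n * gs) 1).length
      (some (g : Int)) (some (n * gs)) n = ((g : Int), n * gs, n) := by
    rw [hlen]
    simp only [PySem.List.sliceIndices, if_neg (show ¬ n < 0 by omega),
      if_neg (show ¬ (g : Int) < 0 by omega), if_neg (show ¬ n * gs < 0 by omega), hcastlen]
    rw [min_eq_left hgle, min_eq_left le_rfl]
  have hcount : (n * gs - (g : Int) + n - 1) / n = gs := by
    have hsplit : n * gs - (g : Int) + n - 1 = (n - 1 - (g : Int)) + n * gs := by ring
    rw [hsplit, Int.add_mul_ediv_left _ _ (by omega : n ≠ 0),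
      Int.ediv_eq_zero_of_lt (by omega) (by omega), zero_add]
  simp only [PySem.List.slice?, hidx, if_neg (by omega : ¬ n = 0)]
  rw [if_pos hn, if_pos (show (g : Int) < n * gs by nlinarith), hcount]
  congr 1
  apply filterMap_eq_map_of
  intro k hk
  simp only [List.mem_range] at hk
  have hkgs : (k : Int) ≤ gs - 1 := by omega
  have hmul : n * (k : Int) ≤ n * (gs - 1) := mul_le_mul_of_nonneg_left hkgs hn.le
  have hlt : (g : Int) + n * k < n * gs := by nlinarith
  have hge : (0 : Int) ≤ (g : Int) + n * k := by positivity
  rw [PySem.List.getElem?_pyRange_one, if_pos (by omega)]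
  congr 1
  omega

-- Slicing the empty list with a positive step yields the empty list.
lemma slice_nil (n limit : Int) (hn : 0 < n) (hlim : limit ≤ 0) (g : Nat) :
    PySem.List.slice? ([] : List Int) (some (g : Int)) (some limit) n = some [] := by
  have hidx : PySem.List.sliceIndices ([] : List Int).length (some (g : Int)) (some limit) n
      = (0, if limit < 0 then 0 else limit, n) := by
    simp only [PySem.List.sliceIndices, List.length_nil, if_neg (show ¬ n < 0 by omega),
      if_neg (show ¬ (g : Int) < 0 by omega), Nat.cast_zero]
    by_cases hl : limit < 0
    · rw [if_pos hl, if_pos hl]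
      simp
      omega
    · rw [if_neg hl, if_neg hl]
      simp
      omega
  simp only [PySem.List.slice?, hidx, if_neg (by omega : ¬ n = 0)]
  rw [if_pos hn, if_neg (by omega : ¬ (0 : Int) < if limit < 0 then 0 else limit)]
  simp

-- ===== VERDICT (by name: the statement is the Claim_ definition above) =====
-- Bucket g of the scatter result, for g in range.
lemma alt_getElem (n gs : Int) (i : Bool) (hn : 0 < n) (g : Nat) :
    (build_replica_groups_alt n gs i)[g]? =
      (if g < (n - 0).toNat then some ((0:Int) + g) else none).map
        (fun _ => ([] : List Int) ++ (PySem.List.pyRange 0 (n * gs) 1).filter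
          (fun nc => ((if i then PySem.Int.mod nc n else PySem.Int.floordiv nc gs)).toNat == g)) := by
  simp only [build_replica_groups_alt, if_pos hn]
  rw [scatter_get (fun nc => if i then PySem.Int.mod nc n else PySem.Int.floordiv nc gs) g]
  rw [List.getElem?_map, PySem.List.getElem?_pyRange_one]
  cases h : (if g < ((n : Int) - 0).toNat then some ((0:Int) + (g:Int)) else none) <;> simp

-- ===== VERDICT (by name: the statement is the Claim_ definition above) =====
theorem build_replica_groups_spec : Claim_equal_build_replica_groups := by
  intro n gs i _
  unfold Spec_build_replica_groups
  by_cases hn : 0 < n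
  · apply List.ext_getElem?
    intro g
    rw [alt_getElem n gs i hn g]
    by_cases hgn : g < ((n : Int) - 0).toNat
    · rw [if_pos hgn]
      have hg : (g : Int) < n := by omega
      cases i
      · -- contiguous
        simp only [build_replica_groups, Bool.false_eq_true, if_false]
        rw [List.getElem?_map, PySem.List.getElem?_pyRange_one, if_pos hgn]
        simp only [Option.map_some, zero_add, List.nil_append]
        by_cases hgs : 0 < gs
        · rw [show (fun nc => (PySem.Int.floordiv nc gs).toNat == g) = (fun x => (x.fdiv gs).toNat == g) from rfl]
          rw [filter_contiguous n gs hn hgs g hg]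
        · have h1 : PySem.List.pyRange (gs * (g : Int)) (gs * (g : Int) + gs) 1 = [] :=
            PySem.List.pyRange_one_eq_nil (by linarith)
          have h2 : PySem.List.pyRange 0 (n * gs) 1 = [] :=
            PySem.List.pyRange_one_eq_nil (mul_nonpos_of_nonneg_of_nonpos hn.le (by omega))
          rw [h1, h2]
          simp
      · -- interleaved
        simp only [build_replica_groups, if_true]
        rw [List.getElem?_map, PySem.List.getElem?_pyRange_one, if_pos hgn]
        simp only [Option.map_some, zero_add, List.nil_append]
        by_cases hgs : 0 < gs
        · rw [slice_interleave n gs hn hgs g hg]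
          have hcast : (((gs.toNat : Nat)) : Int) = gs := Int.toNat_of_nonneg hgs.le
          rw [show (fun nc => (PySem.Int.mod nc n).toNat == g) = (fun x => (x.fmod n).toNat == g) from rfl]
          rw [show (n * gs) = n * ((gs.toNat : Nat) : Int) from by rw [hcast]]
          rw [filter_interleave n hn g hg gs.toNat]
          simp
        · have h2 : PySem.List.pyRange 0 (n * gs) 1 = [] :=
            PySem.List.pyRange_one_eq_nil (mul_nonpos_of_nonneg_of_nonpos hn.le (by omega))
          rw [h2, slice_nil n (n * gs) hn (mul_nonpos_of_nonneg_of_nonpos hn.le (by omega)) g]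
          simp
    · rw [if_neg hgn]
      cases i
      · simp only [build_replica_groups, Bool.false_eq_true, if_false]
        rw [List.getElem?_map, PySem.List.getElem?_pyRange_one, if_neg hgn]
        simp
      · simp only [build_replica_groups, if_true]
        rw [List.getElem?_map, PySem.List.getElem?_pyRange_one, if_neg hgn]
        simp
  · have hnil : PySem.List.pyRange 0 n 1 = [] := PySem.List.pyRange_one_eq_nil (by omega)
    cases i <;> simp [build_replica_groups, build_replica_groups_alt, hnil, hn]
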